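-- pv_equiv track=rewrite | github.com/palantir/spark | dev/log-regression-checker/log-line-extractor.py | extract_log_line
-- ===== SOURCE A (Python) =====
-- def extract_log_line(file_lines, start_index):
--     log_line_string = file_lines[start_index].strip()
--     j = start_index + 1
--     while True:
--         line = file_lines[j].strip()
--         if line.startswith("s\"") or line.startswith("\"") or line.startswith("+"):
--             log_line_string += line
--             j += 1
--         else:
--             break
--     return log_line_string
-- ===== SOURCE B (Python) =====
-- def extract_log_line(file_lines, start_index):
--     head = file_lines[start_index].strip()
--     i = start_index if start_index >= 0 else start_index + len(file_lines)
--     stripped = [line.strip() for line in file_lines[i + 1:]]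
--     stop = next((k for k in range(len(stripped))
--                  if not stripped[k].startswith(("s\"", "\"", "+"))),
--                 len(stripped))
--     return head + ''.join(stripped[:stop])
-- ===== Notes on version B (the rewrite author's own statement) =====
-- stated objective: idiomatic
-- what changed: A's imperative index/mutation loop with string += is replaced by a declarative pipeline: strip the suffix once, locate the first non-continuation line with next() over a generator, and join the matching slice.
-- intended difference: For a negative start_index where every line from there to end-of-file is a continuation line and the file's first line is also a continuation line, A's index wraps around (j passes -1 to 0) and it appends lines from the top of the file again (e.g. '+b+x' at (['+x','y','+b'], -1)); B stops at end-of-file and returns just the line with its real continuations ('+b'), which is the intended reading of 'concatenate a log line with its continuation lines'. — e.g. on extract_log_line(["+x", "y", "+b"], -1): A returns "+b+x", B returns "+b"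
import Mathlib
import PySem

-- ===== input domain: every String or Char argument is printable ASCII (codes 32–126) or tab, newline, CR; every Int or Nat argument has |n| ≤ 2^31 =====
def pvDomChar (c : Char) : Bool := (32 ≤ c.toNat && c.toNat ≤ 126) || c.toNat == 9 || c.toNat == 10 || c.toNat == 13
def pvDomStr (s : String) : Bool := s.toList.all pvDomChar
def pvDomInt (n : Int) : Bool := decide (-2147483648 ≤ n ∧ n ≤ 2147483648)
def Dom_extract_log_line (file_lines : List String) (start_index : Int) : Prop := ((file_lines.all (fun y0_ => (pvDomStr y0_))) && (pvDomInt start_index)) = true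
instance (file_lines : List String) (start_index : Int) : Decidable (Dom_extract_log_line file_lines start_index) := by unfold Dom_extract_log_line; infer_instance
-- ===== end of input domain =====

-- B replaces A's imperative index/mutation loop (string +=) by a declarative strip-once /
-- find-first-stop / join-the-slice pipeline (objective: idiomatic); where A's negative index
-- wraps past -1 back to the file top, B stops at end-of-file (see D_ below).

-- shared helper: is a stripped line a continuation line (line.startswith("s\"") or ("\"") or ("+"))
def pvCont (s : String) : Bool :=
  PySem.Str.startswith s "s\"" || PySem.Str.startswith s "\"" || PySem.Str.startswith s "+"

-- shared helper: the stripped line at index k (only used with k < file_lines.length)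
def pvStripAt (file_lines : List String) (k : Nat) : String :=
  PySem.Str.strip (file_lines.getD k "")

-- ===== PORT A =====
-- the `while True` loop: j is Python's running index; fuel 2*len+2 bounds the iterations the
-- loop can make before Python's own IndexError (pyGet? = none) stops it, so it is never hit
def pvLoopA (file_lines : List String) (acc : String) (j : Int) : Nat → String
  | 0 => acc                                  -- unreachable: fuel exceeds every possible run
  | fuel + 1 =>
    match PySem.List.pyGet? file_lines j with
    | none => acc                             -- IndexError in Python; excluded by Pre_
    | some l =>
      let line := PySem.Str.strip l
      if pvCont line then pvLoopA file_lines (acc ++ line) (j + 1) fuel else acc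

def extract_log_line (file_lines : List String) (start_index : Int) : String :=
  match PySem.List.pyGet? file_lines start_index with
  | none => ""                                -- IndexError in Python; excluded by Pre_
  | some l0 => pvLoopA file_lines (PySem.Str.strip l0) (start_index + 1) (2 * file_lines.length + 2)

-- ===== PORT B =====
def extract_log_line_alt (file_lines : List String) (start_index : Int) : String :=
  match PySem.List.pyGet? file_lines start_index with
  | none => ""                                -- IndexError in Python; excluded by Pre_
  | some l0 =>
    let head := PySem.Str.strip l0
    let i : Int := if 0 ≤ start_index then start_index else start_index + file_lines.length
    let stripped := (PySem.List.slice file_lines (some (i + 1)) none).map PySem.Str.strip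
    -- next((k for k in range(len(stripped)) if not cont), len(stripped)): findIdx is length if absent
    let stop := stripped.findIdx (fun s => !pvCont s)
    head ++ (stripped.take stop).foldl (· ++ ·) ""   -- ''.join(stripped[:stop])

-- ===== PRECONDITION & SPEC =====
-- Pre_ = exactly where A returns: start_index is a valid Python index AND the scan meets a
-- non-continuation line before running off the end (for negative start_index the scan wraps
-- through index 0, so a stop anywhere in the file suffices); otherwise A raises IndexError.
def Pre_extract_log_line (file_lines : List String) (start_index : Int) : Prop :=
  PySem.Raise.InRange file_lines.length start_index ∧
  ((List.range file_lines.length).any (fun k =>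
      (decide (start_index < 0) || decide (start_index < (k : Int)))
        && !pvCont (pvStripAt file_lines k))) = true
instance (file_lines : List String) (start_index : Int) : Decidable (Pre_extract_log_line file_lines start_index) := by
  unfold Pre_extract_log_line; infer_instance

def pvWitness_extract_log_line : List String × Int := (["a", "b"], 0)

-- For negative start_index where every following line to end-of-file is a continuation line
-- and the file's first line is also a continuation line, A's index wraps past -1 to 0 and it
-- appends lines from the top of the file again; B stops at end-of-file, the intended reading
-- of "concatenate a log line with its continuation lines".
def D_extract_log_line (file_lines : List String) (start_index : Int) : Prop :=
  start_index < 0 ∧ PySem.Raise.InRange file_lines.length start_index ∧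
  (pvCont (PySem.Str.strip (file_lines.headD "")) &&
    (file_lines.drop ((start_index + file_lines.length).toNat + 1)).all
      (fun l => pvCont (PySem.Str.strip l))) = true
instance (file_lines : List String) (start_index : Int) : Decidable (D_extract_log_line file_lines start_index) := by
  unfold D_extract_log_line; infer_instance

def Spec_extract_log_line (file_lines : List String) (start_index : Int) (out : String) : Prop :=
  ¬ D_extract_log_line file_lines start_index → out = extract_log_line_alt file_lines start_index
instance (file_lines : List String) (start_index : Int) (out : String) : Decidable (Spec_extract_log_line file_lines start_index out) := by
  unfold Spec_extract_log_line; infer_instance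

def pvDiffWitness_extract_log_line : List String × Int := (["+x", "y", "+b"], -1)
def pvDiffWitnessOut_extract_log_line : String × String := ("+b+x", "+b")

-- ===== CLAIM (what is proved, stated in full; the proofs are below) =====
def Claim_unchanged_extract_log_line : Prop := ∀ (file_lines : List String) (start_index : Int), Dom_extract_log_line file_lines start_index → Pre_extract_log_line file_lines start_index → Spec_extract_log_line file_lines start_index (extract_log_line file_lines start_index)
def Claim_changed_extract_log_line : Prop := Dom_extract_log_line (pvDiffWitness_extract_log_line.1) (pvDiffWitness_extract_log_line.2) ∧ Pre_extract_log_line (pvDiffWitness_extract_log_line.1) (pvDiffWitness_extract_log_line.2) ∧ D_extract_log_line (pvDiffWitness_extract_log_line.1) (pvDiffWitness_extract_log_line.2) ∧ extract_log_line (pvDiffWitness_extract_log_line.1) (pvDiffWitness_extract_log_line.2) = pvDiffWitnessOut_extract_log_line.1 ∧ extract_log_line_alt (pvDiffWitness_extract_log_line.1) (pvDiffWitness_extract_log_line.2) = pvDiffWitnessOut_extract_log_line.2 ∧ pvDiffWitnessOut_extract_log_line.1 ≠ pvDiffWitnessOut_extract_log_line.2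
def Claim_exact_extract_log_line : Prop := ∀ (file_lines : List String) (start_index : Int), Dom_extract_log_line file_lines start_index → Pre_extract_log_line file_lines start_index → D_extract_log_line file_lines start_index → extract_log_line file_lines start_index ≠ extract_log_line_alt file_lines start_index

-- ===== LEMMAS AND PROOFS =====

-- the normalised (Python-style) index of start_index into file_lines (proof-side notion)
def pvIdx (file_lines : List String) (start_index : Int) : Nat :=
  (if 0 ≤ start_index then start_index else start_index + file_lines.length).toNat

-- B's tail value: join of the leading continuation lines of an (already stripped) list
def pvBtail (l : List String) : String :=
  (l.take (l.findIdx (fun s => !pvCont s))).foldl (· ++ ·) ""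

lemma pv_foldl_append (l : List String) (a : String) :
    l.foldl (· ++ ·) a = a ++ l.foldl (· ++ ·) "" := by
  induction l generalizing a with
  | nil => simp [List.foldl, String.append_empty]
  | cons h t ih =>
    simp only [List.foldl, String.empty_append]
    rw [ih (a ++ h), ih h, String.append_assoc]

lemma pv_foldl_cons (s : String) (l : List String) :
    (s :: l).foldl (· ++ ·) "" = s ++ l.foldl (· ++ ·) "" := by
  simp only [List.foldl_cons]
  rw [pv_foldl_append]
  simp

lemma pvBtail_cons_cont (s : String) (l : List String) (h : pvCont s = true) :
    pvBtail (s :: l) = s ++ pvBtail l := by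
  simp only [pvBtail, List.findIdx_cons, h]
  simp only [Bool.not_true, cond_false, List.take_succ_cons, List.foldl]
  rw [pv_foldl_append, String.empty_append]

lemma pvBtail_cons_stop (s : String) (l : List String) (h : pvCont s = false) :
    pvBtail (s :: l) = "" := by
  simp [pvBtail, List.findIdx_cons, h]

lemma pvBtail_all_cont (l : List String) (h : ∀ s ∈ l, pvCont s = true) :
    pvBtail l = l.foldl (· ++ ·) "" := by
  have : l.findIdx (fun s => !pvCont s) = l.length := by
    rw [List.findIdx_eq_length]
    intro s hs; simp [h s hs]
  simp [pvBtail, this]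

lemma pv_pyGet_inrange (fl : List String) (i : Int) (h : PySem.Raise.InRange fl.length i) :
    PySem.List.pyGet? fl i = some (fl.getD (pvIdx fl i) "") := by
  unfold pvIdx
  unfold PySem.List.pyGet? PySem.List.pyIdx? PySem.Raise.InRange at *
  split_ifs with h1 h2 h3 <;> simp_all
  have e : fl.length - (-i).toNat = (i + fl.length).toNat := by omega
  rw [e, List.getElem?_eq_getElem (by omega)]; simp

lemma pv_pyGet_neg (fl : List String) (k : Nat) (h0 : 0 < k) (hk : k < fl.length) :
    PySem.List.pyGet? fl ((k : Int) - fl.length) = some fl[k] := by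
  have hin : PySem.Raise.InRange fl.length ((k : Int) - fl.length) := by
    unfold PySem.Raise.InRange; omega
  rw [pv_pyGet_inrange fl _ hin]
  have : pvIdx fl ((k : Int) - fl.length) = k := by unfold pvIdx; split_ifs <;> omega
  rw [this, List.getD_eq_getElem fl "" hk]

lemma pv_mem_drop (fl : List String) (j x : Nat) (hjx : j ≤ x) (hx : x < fl.length) :
    fl[x] ∈ fl.drop j := by
  have hkj : x - j < (fl.drop j).length := by rw [List.length_drop]; omega
  have hjk : j + (x - j) = x := by omega
  rw [List.mem_iff_getElem]
  refine ⟨x - j, hkj, ?_⟩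
  rw [List.getElem_drop]
  simp [hjk]

lemma pv_stripAt_eq (fl : List String) (x : Nat) (hx : x < fl.length) :
    pvStripAt fl x = PySem.Str.strip fl[x] := by
  unfold pvStripAt; rw [List.getD_eq_getElem fl "" hx]

-- any over the dropped suffix ↔ a stop index exists from j on
lemma pv_any_drop_iff (fl : List String) (j : Nat) :
    (fl.drop j).any (fun s => !pvCont (PySem.Str.strip s)) = true ↔
      ∃ k, j ≤ k ∧ k < fl.length ∧ pvCont (pvStripAt fl k) = false := by
  rw [List.any_eq_true]
  constructor
  · rintro ⟨s, hs, hc⟩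
    obtain ⟨m, hm, rfl⟩ := List.getElem_of_mem hs
    have hmlen : j + m < fl.length := by
      have := hm; rw [List.length_drop] at this; omega
    refine ⟨j + m, by omega, hmlen, ?_⟩
    rw [List.getElem_drop] at hc
    rw [pv_stripAt_eq fl _ hmlen]
    simpa using hc
  · rintro ⟨k, hj, hk, hc⟩
    refine ⟨fl[k], pv_mem_drop fl j k hj hk, ?_⟩
    rw [pv_stripAt_eq fl _ hk] at hc
    simpa using hc

-- one step of A's while-loop
lemma pvLoopA_succ (fl : List String) (acc : String) (j : Int) (f : Nat) :
    pvLoopA fl acc j (f + 1) =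
      match PySem.List.pyGet? fl j with
      | none => acc
      | some l => if pvCont (PySem.Str.strip l) then pvLoopA fl (acc ++ PySem.Str.strip l) (j + 1) f else acc := rfl

-- A's loop from a non-negative index, when a stop exists in the suffix
lemma pv_loopA_pos (fl : List String) :
    ∀ (fuel : Nat) (k : Nat) (acc : String),
      (fl.drop k).any (fun s => !pvCont (PySem.Str.strip s)) = true →
      fl.length - k < fuel →
      pvLoopA fl acc (k : Int) fuel = acc ++ pvBtail ((fl.drop k).map PySem.Str.strip) := by
  intro fuel
  induction fuel with
  | zero =>
    intro k acc hany hlt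
    have hk : k < fl.length := by
      by_contra h
      rw [List.drop_eq_nil_of_le (by omega)] at hany; simp at hany
    omega
  | succ f ih =>
    intro k acc hany hlt
    have hk : k < fl.length := by
      by_contra h
      rw [List.drop_eq_nil_of_le (by omega)] at hany; simp at hany
    have hget : PySem.List.pyGet? fl (k : Int) = some fl[k] := by
      rw [PySem.List.pyGet?_natCast, List.getElem?_eq_getElem hk]
    rw [List.drop_eq_getElem_cons hk] at hany ⊢
    by_cases hc : pvCont (PySem.Str.strip fl[k]) = true
    · rw [pvLoopA_succ, hget]
      simp only [hc, if_true]
      have hany' : (fl.drop (k+1)).any (fun s => !pvCont (PySem.Str.strip s)) = true := by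
        simp only [List.any_cons, hc, Bool.not_true, Bool.false_or] at hany
        exact hany
      have hcast : (k : Int) + 1 = ((k + 1 : Nat) : Int) := by push_cast; ring
      rw [hcast, ih (k + 1) _ hany' (by omega)]
      rw [List.map_cons, pvBtail_cons_cont _ _ hc, String.append_assoc]
    · rw [pvLoopA_succ, hget]
      simp only [Bool.not_eq_true] at hc
      simp only [hc, Bool.false_eq_true, if_false]
      rw [List.map_cons, pvBtail_cons_stop _ _ hc, String.append_empty]

-- A's loop from a negative index (k - n, 0 < k), when a stop exists in positions [k, n)
lemma pv_loopA_negstop (fl : List String) :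
    ∀ (fuel : Nat) (k : Nat) (acc : String), 0 < k →
      (fl.drop k).any (fun s => !pvCont (PySem.Str.strip s)) = true →
      fl.length - k < fuel →
      pvLoopA fl acc ((k : Int) - fl.length) fuel = acc ++ pvBtail ((fl.drop k).map PySem.Str.strip) := by
  intro fuel
  induction fuel with
  | zero =>
    intro k acc h0 hany hlt
    have hk : k < fl.length := by
      by_contra h
      rw [List.drop_eq_nil_of_le (by omega)] at hany; simp at hany
    omega
  | succ f ih =>
    intro k acc h0 hany hlt
    have hk : k < fl.length := by
      by_contra h
      rw [List.drop_eq_nil_of_le (by omega)] at hany; simp at hany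
    have hget := pv_pyGet_neg fl k h0 hk
    rw [List.drop_eq_getElem_cons hk] at hany ⊢
    by_cases hc : pvCont (PySem.Str.strip fl[k]) = true
    · rw [pvLoopA_succ, hget]
      simp only [hc, if_true]
      have hany' : (fl.drop (k+1)).any (fun s => !pvCont (PySem.Str.strip s)) = true := by
        simp only [List.any_cons, hc, Bool.not_true, Bool.false_or] at hany
        exact hany
      have hcast : (k : Int) - fl.length + 1 = ((k + 1 : Nat) : Int) - fl.length := by push_cast; ring
      rw [hcast, ih (k + 1) _ (by omega) hany' (by omega)]
      rw [List.map_cons, pvBtail_cons_cont _ _ hc, String.append_assoc]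
    · rw [pvLoopA_succ, hget]
      simp only [Bool.not_eq_true] at hc
      simp only [hc, Bool.false_eq_true, if_false]
      rw [List.map_cons, pvBtail_cons_stop _ _ hc, String.append_empty]

-- A's loop from a negative index when every line in [k, n) is a continuation: it consumes
-- them all and arrives at index 0 with fuel to spare
lemma pv_loopA_neg_all (fl : List String) :
    ∀ (fuel : Nat) (k : Nat) (acc : String), 0 < k → k ≤ fl.length →
      (∀ s ∈ fl.drop k, pvCont (PySem.Str.strip s) = true) →
      fl.length - k < fuel →
      ∃ fuel', 0 < fuel' ∧
        pvLoopA fl acc ((k : Int) - fl.length) fuel =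
          pvLoopA fl (acc ++ ((fl.drop k).map PySem.Str.strip).foldl (· ++ ·) "") 0 fuel' := by
  intro fuel
  induction fuel with
  | zero => intro k acc h0 hkn hall hlt; omega
  | succ f ih =>
    intro k acc h0 hkn hall hlt
    rcases Nat.lt_or_ge k fl.length with hk | hk
    · have hget := pv_pyGet_neg fl k h0 hk
      have hmem : fl[k] ∈ fl.drop k := by
        rw [List.drop_eq_getElem_cons hk]; exact List.mem_cons_self
      have hc := hall _ hmem
      have hall' : ∀ s ∈ fl.drop (k+1), pvCont (PySem.Str.strip s) = true := by
        intro s hs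
        exact hall s (by rw [List.drop_eq_getElem_cons hk]; exact List.mem_cons_of_mem _ hs)
      have hcast : (k : Int) - fl.length + 1 = ((k + 1 : Nat) : Int) - fl.length := by push_cast; ring
      obtain ⟨fuel', hf0, heq⟩ := ih (k + 1) (acc ++ PySem.Str.strip fl[k]) (by omega) (by omega) hall' (by omega)
      refine ⟨fuel', hf0, ?_⟩
      rw [pvLoopA_succ, hget]
      simp only [hc, if_true]
      have hacc : (acc ++ PySem.Str.strip fl[k]) ++ ((fl.drop (k + 1)).map PySem.Str.strip).foldl (· ++ ·) ""
          = acc ++ ((fl.drop k).map PySem.Str.strip).foldl (· ++ ·) "" := by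
        rw [List.drop_eq_getElem_cons hk, List.map_cons, pv_foldl_cons, String.append_assoc]
      rw [hcast, heq, hacc]
    · have hkl : k = fl.length := by omega
      refine ⟨f + 1, by omega, ?_⟩
      subst hkl
      simp [String.append_empty]

lemma pv_loopA_prefix (fl : List String) :
    ∀ (fuel : Nat) (j : Int) (acc : String), ∃ r, pvLoopA fl acc j fuel = acc ++ r := by
  intro fuel
  induction fuel with
  | zero => intro j acc; exact ⟨"", by simp [pvLoopA]⟩
  | succ f ih =>
    intro j acc
    unfold pvLoopA
    cases hget : PySem.List.pyGet? fl j with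
    | none => exact ⟨"", by simp⟩
    | some l =>
      simp only []
      by_cases hc : pvCont (PySem.Str.strip l) = true
      · simp only [hc, if_true]
        obtain ⟨r, hr⟩ := ih (j + 1) (acc ++ PySem.Str.strip l)
        exact ⟨PySem.Str.strip l ++ r, by rw [hr, String.append_assoc]⟩
      · simp only [Bool.not_eq_true] at hc
        simp only [hc, Bool.false_eq_true, if_false]
        exact ⟨"", by simp⟩

lemma pv_cont_ne_empty (s : String) (h : pvCont s = true) : s.toList ≠ [] := by
  intro hnil
  unfold pvCont at h
  simp only [Bool.or_eq_true] at h
  rcases h with (h | h) | h <;>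
  · rw [PySem.Str.startswith_eq, PySem.Chars.startswith_iff, hnil] at h
    have := List.prefix_nil.mp h
    simp at this

-- both ports, unfolded under InRange
lemma pv_a_eq (fl : List String) (si : Int) (h : PySem.Raise.InRange fl.length si) :
    extract_log_line fl si =
      pvLoopA fl (pvStripAt fl (pvIdx fl si)) (si + 1) (2 * fl.length + 2) := by
  unfold extract_log_line pvStripAt
  rw [pv_pyGet_inrange fl si h]

lemma pv_alt_eq (fl : List String) (si : Int) (h : PySem.Raise.InRange fl.length si) :
    extract_log_line_alt fl si =
      pvStripAt fl (pvIdx fl si) ++ pvBtail ((fl.drop (pvIdx fl si + 1)).map PySem.Str.strip) := by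
  have hin := h
  unfold PySem.Raise.InRange at hin
  unfold extract_log_line_alt pvBtail pvStripAt
  rw [pv_pyGet_inrange fl si h]
  simp only []
  have hnn : 0 ≤ (if 0 ≤ si then si else si + fl.length) + 1 := by split_ifs <;> omega
  rw [PySem.List.slice_from _ hnn]
  have e : ((if 0 ≤ si then si else si + fl.length) + 1).toNat = pvIdx fl si + 1 := by
    unfold pvIdx; split_ifs <;> omega

  rw [e]

-- ===== VERDICT (by name: the statement is the Claim_ definition above) =====
theorem extract_log_line_spec : Claim_unchanged_extract_log_line := by
  intro fl si hdom hpre hnd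
  obtain ⟨hin, hany⟩ := hpre
  have hrange := hin
  unfold PySem.Raise.InRange at hrange
  have hi : pvIdx fl si < fl.length := by unfold pvIdx; split_ifs <;> omega
  rw [pv_a_eq fl si hin, pv_alt_eq fl si hin]
  rw [List.any_eq_true] at hany
  obtain ⟨k, hkmem, hkp⟩ := hany
  rw [List.mem_range] at hkmem
  simp only [Bool.and_eq_true, Bool.or_eq_true, decide_eq_true_eq, Bool.not_eq_true'] at hkp
  obtain ⟨hkor, hkc⟩ := hkp
  by_cases hsi : 0 ≤ si
  · have hpv : (pvIdx fl si : Int) = si := by unfold pvIdx; split_ifs; omega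
    have hk2 : pvIdx fl si < k := by
      rcases hkor with h | h
      · omega
      · omega
    have hany' : (fl.drop (pvIdx fl si + 1)).any (fun s => !pvCont (PySem.Str.strip s)) = true :=
      (pv_any_drop_iff fl _).mpr ⟨k, by omega, hkmem, hkc⟩
    have hcast : si + 1 = ((pvIdx fl si + 1 : Nat) : Int) := by unfold pvIdx; split_ifs; omega
    rw [hcast]
    exact pv_loopA_pos fl _ _ _ hany' (by omega)
  · have hcast : si + 1 = ((pvIdx fl si + 1 : Nat) : Int) - fl.length := by
      unfold pvIdx; split_ifs; omega
    rw [hcast]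
    by_cases hd2 : (fl.drop (pvIdx fl si + 1)).any (fun s => !pvCont (PySem.Str.strip s)) = true
    · exact pv_loopA_negstop fl _ _ _ (by omega) hd2 (by omega)
    · have hall : ∀ s ∈ fl.drop (pvIdx fl si + 1), pvCont (PySem.Str.strip s) = true := by
        intro s hs
        by_contra hcs
        apply hd2
        rw [List.any_eq_true]
        exact ⟨s, hs, by simp [Bool.not_eq_true] at hcs ⊢; exact hcs⟩
      have hc0 : pvCont (pvStripAt fl 0) = false := by
        by_contra hc0
        simp only [Bool.not_eq_false] at hc0
        apply hnd
        refine ⟨by omega, hin, ?_⟩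
        rw [Bool.and_eq_true]
        refine ⟨?_, ?_⟩
        · have hh : fl.headD "" = fl.getD 0 "" := by cases fl <;> rfl
          unfold pvStripAt at hc0
          rw [hh]; exact hc0
        · rw [List.all_eq_true]
          intro s hs
          have e : (si + (fl.length : Int)).toNat + 1 = pvIdx fl si + 1 := by
            unfold pvIdx; split_ifs; omega
          rw [e] at hs
          exact hall s hs
      obtain ⟨fuel', hf0, heq⟩ :=
        pv_loopA_neg_all fl (2 * fl.length + 2) (pvIdx fl si + 1) _ (by omega) (by omega) hall (by omega)
      rw [heq]
      obtain ⟨f', rfl⟩ : ∃ f', fuel' = f' + 1 := ⟨fuel' - 1, by omega⟩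
      have hn0 : 0 < fl.length := by omega
      have hget0 : PySem.List.pyGet? fl 0 = some fl[0] := by
        rw [PySem.List.pyGet?_zero, List.getElem?_eq_getElem hn0]
      rw [pvLoopA_succ, hget0]
      have hc0' : pvCont (PySem.Str.strip fl[0]) = false := by
        rw [← pv_stripAt_eq fl 0 hn0]; exact hc0
      simp only [hc0', Bool.false_eq_true, if_false]
      rw [pvBtail_all_cont]
      intro s hs
      rw [List.mem_map] at hs
      obtain ⟨t, ht, rfl⟩ := hs
      exact hall t ht

theorem extract_log_line_changed : Claim_changed_extract_log_line := by
  unfold Claim_changed_extract_log_line; decide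

theorem extract_log_line_tight : Claim_exact_extract_log_line := by
  intro fl si hdom hpre hd
  obtain ⟨hneg, hin, hD⟩ := hd
  rw [Bool.and_eq_true] at hD
  obtain ⟨hc0h, halld⟩ := hD
  have hc0 : pvCont (pvStripAt fl 0) = true := by
    have hh : fl.headD "" = fl.getD 0 "" := by cases fl <;> rfl
    unfold pvStripAt
    rw [← hh]; exact hc0h
  have hrange := hin
  unfold PySem.Raise.InRange at hrange
  have hi : pvIdx fl si < fl.length := by unfold pvIdx; split_ifs <;> omega
  have hn0 : 0 < fl.length := by omega
  rw [pv_a_eq fl si hin, pv_alt_eq fl si hin]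
  have hall : ∀ s ∈ fl.drop (pvIdx fl si + 1), pvCont (PySem.Str.strip s) = true := by
    intro s hs
    rw [List.all_eq_true] at halld
    have e : (si + (fl.length : Int)).toNat + 1 = pvIdx fl si + 1 := by
      unfold pvIdx; split_ifs <;> omega
    rw [← e] at hs
    exact halld s hs
  have hcast : si + 1 = ((pvIdx fl si + 1 : Nat) : Int) - fl.length := by
    unfold pvIdx; split_ifs <;> omega
  rw [hcast]
  obtain ⟨fuel', hf0, heq⟩ :=
    pv_loopA_neg_all fl (2 * fl.length + 2) (pvIdx fl si + 1) _ (by omega) (by omega) hall (by omega)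
  rw [heq]
  obtain ⟨f', rfl⟩ : ∃ f', fuel' = f' + 1 := ⟨fuel' - 1, by omega⟩
  have hget0 : PySem.List.pyGet? fl 0 = some fl[0] := by
    rw [PySem.List.pyGet?_zero, List.getElem?_eq_getElem hn0]
  rw [pvLoopA_succ, hget0]
  have hc0' : pvCont (PySem.Str.strip fl[0]) = true := by
    rw [← pv_stripAt_eq fl 0 hn0]; exact hc0
  simp only [hc0', if_true]
  obtain ⟨r, hr⟩ := pv_loopA_prefix fl f' (0 + 1) _
  rw [hr]
  rw [pvBtail_all_cont]
  · intro heq2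
    have htl := congrArg String.toList heq2
    simp only [String.toList_append] at htl
    have hlen := congrArg List.length htl
    simp only [List.length_append] at hlen
    have hne := pv_cont_ne_empty _ hc0'
    have hpos : 0 < (PySem.Str.strip fl[0]).toList.length := List.length_pos_iff.mpr hne
    omega
  · intro s hs
    rw [List.mem_map] at hs
    obtain ⟨t, ht, rfl⟩ := hs
    exact hall t ht
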